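-- pv_equiv track=rewrite | github.com/wkerby/PCAP_prep | mysplitfunction.py | mysplit
-- ===== SOURCE A (Python) =====
-- def mysplit(some_string):
-- 	string_dict = {}
-- 	for i in list(range(len(some_string))):
-- 		string_dict[i] = some_string[i]
-- 	spaces = [i for i,x in list(string_dict.items()) if x.isspace() == True]
-- 	split_list = []
-- 	if len(spaces) == 0:
-- 		split_list.append(some_string)
-- 	else:
-- 		for i in spaces:
-- 			if len(spaces) == 1:
-- 				split_list.append(some_string[:i])
-- 				split_list.append(some_string[i+1:])
-- 				break
-- 			else:
-- 				if i == spaces[0]: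
-- 					split_list.append(some_string[:i])
-- 					z = 0
-- 				elif i in spaces[1:len(spaces)]:
-- 					beg_index = spaces[z] + 1
-- 					# beg_index = spaces[spaces.index(i-1)]
-- 					end_index = spaces[z+1]
-- 					# end_index = spaces[spaces.index(i-1)+1]
-- 					split_list.append(some_string[beg_index:end_index])
-- 					z += 1
-- 					if z == len(spaces) - 1:
-- 						split_list.append(some_string[i+1:len(some_string)])
--
-- 	#remove any fragments that represent blank space
-- 	for i in list(range(len(split_list))):
-- 		for frag in split_list:
-- 			if bool(frag) == False:
-- 				split_list.remove(frag)
--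
-- 	return split_list
-- ===== SOURCE B (Python) =====
-- def mysplit(some_string):
-- 	result = []
-- 	buf = []
-- 	for c in some_string:
-- 		if c.isspace():
-- 			if buf:
-- 				result.append(''.join(buf))
-- 				buf = []
-- 		else:
-- 			buf.append(c)
-- 	if buf:
-- 		result.append(''.join(buf))
-- 	return result
-- ===== Notes on version B (the rewrite author's own statement) =====
-- stated objective: faster
-- what changed: Replaced A's index dictionary, whitespace-index list with membership scans over spaces[1:], slice arithmetic with a manual z counter, and the quadratic post-hoc empty-fragment removal passes by a single left-to-right pass maintaining a current-word buffer flushed at whitespace.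
import Mathlib
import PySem

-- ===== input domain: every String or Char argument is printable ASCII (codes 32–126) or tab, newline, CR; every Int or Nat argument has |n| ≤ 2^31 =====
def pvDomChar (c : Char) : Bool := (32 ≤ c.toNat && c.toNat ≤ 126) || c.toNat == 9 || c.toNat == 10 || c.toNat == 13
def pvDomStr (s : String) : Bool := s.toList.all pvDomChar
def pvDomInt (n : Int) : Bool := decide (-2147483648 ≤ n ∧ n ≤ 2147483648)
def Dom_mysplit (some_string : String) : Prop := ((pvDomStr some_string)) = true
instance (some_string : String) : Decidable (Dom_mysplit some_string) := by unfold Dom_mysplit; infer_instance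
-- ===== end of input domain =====

-- B replaces A's index dictionary, space-index list, slicing with a z counter and the post-hoc
-- empty-fragment removal passes by one buffered left-to-right pass; same return value proved.


-- ===== PORT A =====
-- one removal pass: `for frag in split_list: if bool(frag) == False: split_list.remove(frag)`
-- (Python iterates by index over the list it mutates; `remove` always finds "" here since
--  frag = l[j] = "", so the total `.getD l` form is exact)
def pyRemovePass (l : List String) (j : Nat) : List String :=
  if h : j < l.length then
    if l[j] = "" then pyRemovePass ((PySem.List.remove? l "").getD l) (j + 1)
    else pyRemovePass l (j + 1)
  else l
termination_by l.length - j
decreasing_by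
  · rename_i hj
    have hm : "" ∈ l := hj ▸ List.getElem_mem h
    rw [PySem.List.remove?_eq_some_erase l "" hm, Option.getD_some]
    have := List.length_erase_of_mem hm
    omega
  · omega

-- the body of A's `for i in spaces:` loop; state = (split_list, z, broke).
-- spaces[0] / spaces[z] / spaces[z+1] are in range wherever this Python reads them,
-- so the total pyGetD form is exact; z is read only after the first iteration set it.
def mysplitBody (cs : List Char) (spaces : List Int) :
    List String × Int × Bool → Int → List String × Int × Bool :=
  fun (acc, z, broke) i =>
    if broke then (acc, z, broke)
    else if spaces.length = 1 then
      (acc ++ [String.ofList (PySem.List.slice cs none (some i)),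
               String.ofList (PySem.List.slice cs (some (i + 1)) none)], z, true)
    else if i == PySem.List.pyGetD spaces 0 0 then
      (acc ++ [String.ofList (PySem.List.slice cs none (some i))], 0, false)
    else if (PySem.List.slice spaces (some 1) (some (spaces.length : Int))).contains i then
      let beg_index := PySem.List.pyGetD spaces z 0 + 1
      let end_index := PySem.List.pyGetD spaces (z + 1) 0
      let acc' := acc ++ [String.ofList (PySem.List.slice cs (some beg_index) (some end_index))]
      let z' := z + 1
      if z' == (spaces.length : Int) - 1 then
        (acc' ++ [String.ofList (PySem.List.slice cs (some (i + 1)) (some (cs.length : Int)))], z', false)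
      else (acc', z', false)
    else (acc, z, broke)

def mysplit (some_string : String) : List String :=
  let cs := some_string.toList
  -- string_dict = {}; for i in list(range(len(some_string))): string_dict[i] = some_string[i]
  -- (index i is always in range, so the total pyGetD form of some_string[i] is exact)
  let string_dict : PySem.Dict Int Char :=
    (PySem.List.pyRange 0 cs.length).foldl
      (fun d i => d.insert i (PySem.List.pyGetD cs i ' ')) PySem.Dict.empty
  -- spaces = [i for i, x in list(string_dict.items()) if x.isspace() == True]
  let spaces : List Int :=
    (string_dict.items.filter (fun p => PySem.Chars.isspace p.2)).map (·.1)
  let split_list : List String :=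
    if spaces.length = 0 then [some_string]
    else (spaces.foldl (mysplitBody cs spaces) ([], 0, false)).1
  -- for i in list(range(len(split_list))): one removal pass each
  (PySem.List.pyRange 0 split_list.length).foldl (fun l _ => pyRemovePass l 0) split_list

-- ===== PORT B =====
-- Source B: one pass, buffer flushed at whitespace; ''.join of a char buffer is String.ofList
def mysplitAltStep (st : List String × List Char) (c : Char) : List String × List Char :=
  if PySem.Chars.isspace c then
    if st.2 ≠ [] then (st.1 ++ [String.ofList st.2], []) else st
  else (st.1, st.2 ++ [c])

def mysplit_alt (some_string : String) : List String :=
  let st := some_string.toList.foldl mysplitAltStep ([], [])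
  if st.2 ≠ [] then st.1 ++ [String.ofList st.2] else st.1

-- ===== PRECONDITION & SPEC =====
def Spec_mysplit (some_string : String) (out : List String) : Prop := out = mysplit_alt some_string
instance (some_string : String) (out : List String) : Decidable (Spec_mysplit some_string out) := by unfold Spec_mysplit; infer_instance

-- ===== CLAIM (what is proved, stated in full; the proofs are below) =====
def Claim_equal_mysplit : Prop := ∀ (some_string : String), Dom_mysplit some_string → Spec_mysplit some_string (mysplit some_string)

-- ===== LEMMAS AND PROOFS =====

-- positions of whitespace characters, and the raw segments they cut (empties kept)
def wsIdx : List Char → List Nat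
  | [] => []
  | c :: cs => if PySem.Chars.isspace c then 0 :: (wsIdx cs).map (· + 1) else (wsIdx cs).map (· + 1)

def segs (cs : List Char) : Nat → List Nat → List (List Char)
  | b, [] => [cs.drop b]
  | b, i :: is => (cs.drop b).take (i - b) :: segs cs (i + 1) is

def pb (buf : List Char) : List (List Char) → List (List Char)
  | [] => [buf]
  | p :: ps => (buf ++ p) :: ps

theorem segs_ne_nil (cs : List Char) (b : Nat) (is : List Nat) : segs cs b is ≠ [] := by
  cases is <;> simp [segs]

theorem segs_shift (c : Char) (cs : List Char) (is : List Nat) (b : Nat) :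
    segs (c :: cs) (b + 1) (is.map (· + 1)) = segs cs b is := by
  induction is generalizing b with
  | nil => simp [segs]
  | cons i is ih => simp [segs, ih (i + 1), Nat.succ_sub_succ]

theorem pb_cons_char (buf : List Char) (c : Char) (cs : List Char) (is : List Nat) :
    pb buf (segs (c :: cs) 0 (is.map (· + 1))) = pb (buf ++ [c]) (segs cs 0 is) := by
  cases is with
  | nil => simp [segs, pb]
  | cons i is =>
    have h := segs_shift c cs is (i + 1)
    simp only [List.map_cons, segs, Nat.sub_zero, List.drop_zero, List.take_succ_cons, h, pb]
    simp

theorem wsIdx_pairwise (cs : List Char) : (wsIdx cs).Pairwise (· < ·) := by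
  induction cs with
  | nil => simp [wsIdx]
  | cons c cs ih =>
    unfold wsIdx
    have hm : ((wsIdx cs).map (· + 1)).Pairwise (· < ·) := by
      refine List.pairwise_map.2 (ih.imp ?_); omega
    split
    · exact List.Pairwise.cons (by simp) hm
    · exact hm

-- B's fold computes acc ++ the non-empty segments, with buf prepended to the first segment
theorem pb_nil (l : List (List Char)) (h : l ≠ []) : pb [] l = l := by
  cases l with
  | nil => exact absurd rfl h
  | cons p ps => simp [pb]

theorem alt_fold (cs : List Char) (acc : List String) (buf : List Char) :
    (let st := cs.foldl mysplitAltStep (acc, buf)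
     if st.2 ≠ [] then st.1 ++ [String.ofList st.2] else st.1)
      = acc ++ ((pb buf (segs cs 0 (wsIdx cs))).filter (· ≠ [])).map String.ofList := by
  induction cs generalizing acc buf with
  | nil =>
    by_cases hb : buf = [] <;> simp [hb, wsIdx, segs, pb]
  | cons c cs ih =>
    simp only [List.foldl_cons]
    unfold wsIdx
    by_cases hs : PySem.Chars.isspace c
    · have hshift : segs (c :: cs) (0 + 1) ((wsIdx cs).map (· + 1)) = segs cs 0 (wsIdx cs) :=
        segs_shift c cs (wsIdx cs) 0
      by_cases hb : buf = []
      · have ihx := ih acc []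
        rw [pb_nil _ (segs_ne_nil cs 0 (wsIdx cs))] at ihx
        simp only [hs, if_true, mysplitAltStep, hb, ne_eq, not_true_eq_false, if_false]
        rw [ihx]
        simp [segs, hshift, pb]
      · have ihx := ih (acc ++ [String.ofList buf]) []
        rw [pb_nil _ (segs_ne_nil cs 0 (wsIdx cs))] at ihx
        simp only [mysplitAltStep, hs, if_true, hb, ne_eq, not_false_eq_true, if_true]
        rw [ihx]
        simp [segs, hshift, pb, hb]
    · simp only [mysplitAltStep, hs, if_false, Bool.false_eq_true]
      rw [ih acc (buf ++ [c])]
      simp only [pb_cons_char]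

-- A's spaces list is wsIdx, cast to Int
theorem enumerate_filter_isspace (cs : List Char) (s : Int) :
    ((PySem.List.enumerate cs s).filter (fun p => PySem.Chars.isspace p.2)).map (·.1)
      = (wsIdx cs).map (fun j : Nat => s + (j : Int)) := by
  induction cs generalizing s with
  | nil => simp [wsIdx, PySem.List.enumerate_nil]
  | cons c cs ih =>
    rw [PySem.List.enumerate_cons]
    unfold wsIdx
    by_cases hs : PySem.Chars.isspace c
    · rw [List.filter_cons_of_pos (by simpa using hs), if_pos hs]
      simp only [List.map_cons, ih (s + 1), List.map_map]
      congr 1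
      · simp
      · exact List.map_congr_left (fun j _ => by simp only [Function.comp_apply]; push_cast; ring)
    · rw [List.filter_cons_of_neg (by simpa using hs), if_neg hs]
      simp only [ih (s + 1), List.map_map]
      exact List.map_congr_left (fun j _ => by simp only [Function.comp_apply]; push_cast; ring)

theorem spaces_eq (cs : List Char) :
    ((((PySem.List.pyRange 0 cs.length).foldl
        (fun d i => d.insert i (PySem.List.pyGetD cs i ' ')) PySem.Dict.empty).items.filter
          (fun p => PySem.Chars.isspace p.2)).map (·.1))
      = (wsIdx cs).map (fun j : Nat => (j : Int)) := by
  have hnodup : ((PySem.List.pyRange 0 (cs.length : Int)).map (fun i => i)).Nodup := by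
    simp only [List.map_id_fun', id]
    rw [PySem.List.pyRange_zero_natCast]
    exact (List.nodup_range (n := cs.length)).map (fun a b h => by exact_mod_cast h)
  have hitems := PySem.Dict.items_foldl_insert_fresh (PySem.List.pyRange 0 (cs.length : Int))
      (fun i => i) (fun i => PySem.List.pyGetD cs i ' ') PySem.Dict.empty
      (fun a _ => PySem.Dict.contains_empty a) hnodup
  have hempty : (PySem.Dict.empty : PySem.Dict Int Char).items = [] := rfl
  simp only [hempty, List.nil_append] at hitems
  have he := enumerate_filter_isspace cs 0
  rw [PySem.List.enumerate_eq_map_pyRange cs ' '] at he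
  simp only [PySem.List.len] at he
  rw [hitems]
  simpa using he

-- evaluating A's loop body at the (k+1)-st space, state (acc, k, false)
theorem body_eval (cs : List Char) (is : List Nat) (hp : is.Pairwise (· < ·))
    (hL : 2 ≤ is.length) (k : Nat) (hk : k + 1 < is.length) (acc : List String) :
    mysplitBody cs (is.map (fun j : Nat => (j : Int))) (acc, (k : Int), false)
        ((is[k + 1]'hk : Nat) : Int)
      = (acc ++ [String.ofList ((cs.drop (is[k]'(by omega) + 1)).take
            (is[k + 1]'hk - (is[k]'(by omega) + 1)))]
          ++ (if k + 2 = is.length then [String.ofList (cs.drop (is[k + 1]'hk + 1))] else []),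
         (k : Int) + 1, false) := by
  have hk0 : k < is.length := by omega
  have h0 : 0 < is.length := by omega
  have h0k : is[0]'h0 < is[k + 1]'hk :=
    List.pairwise_iff_getElem.1 hp 0 (k + 1) h0 hk (by omega)
  have hS0 : PySem.List.pyGetD (is.map (fun j : Nat => (j : Int))) 0 0 = ((is[0]'h0 : Nat) : Int) := by
    rw [PySem.List.pyGetD_ofNat']
    rw [List.getD_eq_getElem _ _ (by simpa using h0)]
    simp
  have hSk : PySem.List.pyGetD (is.map (fun j : Nat => (j : Int))) (k : Int) 0
      = ((is[k]'hk0 : Nat) : Int) := by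
    rw [PySem.List.pyGetD_natCast, List.getD_eq_getElem _ _ (by simpa using hk0)]
    simp
  have hcast1 : ((k : Int) + 1) = ((k + 1 : Nat) : Int) := by push_cast; ring
  have hSk1 : PySem.List.pyGetD (is.map (fun j : Nat => (j : Int))) ((k : Int) + 1) 0
      = ((is[k + 1]'hk : Nat) : Int) := by
    rw [hcast1, PySem.List.pyGetD_natCast, List.getD_eq_getElem _ _ (by simpa using hk)]
    simp
  have hne0 : (((is[k + 1]'hk : Nat) : Int) == ((is[0]'h0 : Nat) : Int)) = false := by
    simp only [beq_eq_false_iff_ne, ne_eq, Nat.cast_inj]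
    omega
  have hmem : is[k + 1]'hk ∈ is.drop 1 := by
    refine List.mem_iff_getElem.2 ⟨k, by simp; omega, ?_⟩
    rw [List.getElem_drop]
    congr 1
    omega
  have hcont : ((is[k + 1]'hk : Nat) : Int) ∈ PySem.List.slice
      (is.map (fun j : Nat => (j : Int))) (some 1) (some (is.length : Int)) := by
    rw [show ((1 : Int)) = ((1 : Nat) : Int) from rfl]
    rw [show ((is.length : Nat) : Int) = (((is.map (fun j : Nat => (j : Int))).length : Nat) : Int)
          from by simp]
    rw [PySem.List.slice_natCast]
    rw [List.take_of_length_le (by simp)]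
    rw [← List.map_drop]
    exact List.mem_map_of_mem hmem
  have hiff : (((k : Int) + 1) = ((is.length : Nat) : Int) - 1) ↔ k + 2 = is.length := by omega
  have hbeg : ((is[k]'hk0 : Nat) : Int) + 1 = ((is[k]'hk0 + 1 : Nat) : Int) := by push_cast; ring
  have hmid : PySem.List.slice cs (some (((is[k]'hk0 : Nat) : Int) + 1))
      (some ((is[k + 1]'hk : Nat) : Int))
      = (cs.drop (is[k]'hk0 + 1)).take (is[k + 1]'hk - (is[k]'hk0 + 1)) := by
    rw [hbeg, PySem.List.slice_natCast]
  have htail : PySem.List.slice cs (some (((is[k + 1]'hk : Nat) : Int) + 1))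
      (some (cs.length : Int)) = cs.drop (is[k + 1]'hk + 1) := by
    rw [show ((is[k + 1]'hk : Nat) : Int) + 1 = ((is[k + 1]'hk + 1 : Nat) : Int) from by push_cast; ring]
    rw [PySem.List.slice_natCast]
    exact List.take_of_length_le (by simp)
  unfold mysplitBody
  simp only [Bool.false_eq_true, if_false, List.length_map, hS0, hSk, hSk1, hne0,
    if_neg (by omega : ¬ is.length = 1), beq_iff_eq, hiff, hmid, htail]
  by_cases hlast : k + 2 = is.length
  · simp [hlast, List.append_assoc]
    exact hcont
  · simp [hlast]
    exact hcont

-- the main loop, from the second space on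
theorem foldA (cs : List Char) (is : List Nat) (hp : is.Pairwise (· < ·)) (hL : 2 ≤ is.length) :
    ∀ n k acc, (hk : k + 1 < is.length) → is.length - (k + 1) = n →
      (((is.drop (k + 1)).map (fun j : Nat => (j : Int))).foldl
          (mysplitBody cs (is.map (fun j : Nat => (j : Int)))) (acc, (k : Int), false)).1
        = acc ++ (segs cs (is[k]'(by omega) + 1) (is.drop (k + 1))).map String.ofList := by
  intro n
  induction n with
  | zero => intro k acc hk hn; omega
  | succ n ih =>
    intro k acc hk hn
    have hd : is.drop (k + 1) = is[k + 1]'hk :: is.drop (k + 2) := List.drop_eq_getElem_cons hk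
    rw [hd, List.map_cons, List.foldl_cons, body_eval cs is hp hL k hk acc]
    by_cases hlast : k + 2 = is.length
    · have hd2 : is.drop (k + 2) = [] := List.drop_eq_nil_of_le (by omega)
      rw [hd2, List.map_nil, List.foldl_nil]
      simp only [if_pos hlast, segs, List.map_cons, List.map_nil, List.append_assoc,
        List.cons_append, List.nil_append]
    · have hk2 : k + 2 ≤ is.length := by omega
      have hk2' : (k + 1) + 1 < is.length := by omega
      rw [if_neg hlast]
      have hcast1 : ((k : Int) + 1) = ((k + 1 : Nat) : Int) := by push_cast; ring
      rw [hcast1]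
      have := ih (k + 1)
        (acc ++ [String.ofList ((cs.drop (is[k]'(by omega) + 1)).take
          (is[k + 1]'hk - (is[k]'(by omega) + 1)))])
        hk2' (by omega)
      simp only [show k + 1 + 1 = k + 2 from rfl] at this
      rw [List.append_nil, this]
      simp only [segs, List.map_cons, List.append_assoc, List.cons_append, List.nil_append]

-- A's split_list before the removal passes
theorem pre_eq (cs : List Char) :
    (if ((wsIdx cs).map (fun j : Nat => (j : Int))).length = 0 then [String.ofList cs]
     else (((wsIdx cs).map (fun j : Nat => (j : Int))).foldl
        (mysplitBody cs ((wsIdx cs).map (fun j : Nat => (j : Int)))) ([], 0, false)).1)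
      = (segs cs 0 (wsIdx cs)).map String.ofList := by
  have hp0 : (wsIdx cs).Pairwise (· < ·) := wsIdx_pairwise cs
  cases hw : wsIdx cs with
  | nil => simp [segs]
  | cons i0 tl =>
    rw [hw] at hp0
    cases tl with
    | nil =>
      rw [if_neg (by simp)]
      simp only [List.map_cons, List.map_nil, List.foldl_cons, List.foldl_nil]
      have h1 : PySem.List.slice cs none (some ((i0 : Nat) : Int)) = cs.take i0 := by
        rw [PySem.List.slice_to cs (by positivity)]
        simp
      have h2 : PySem.List.slice cs (some (((i0 : Nat) : Int) + 1)) none = cs.drop (i0 + 1) := by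
        rw [show ((i0 : Nat) : Int) + 1 = ((i0 + 1 : Nat) : Int) from by push_cast; ring]
        rw [PySem.List.slice_from cs (by positivity)]
        simp
      simp [mysplitBody, segs, h1, h2]
    | cons i1 tl2 =>
      rw [if_neg (by simp)]
      have hL : 2 ≤ (i0 :: i1 :: tl2).length := by simp
      have hfold := foldA cs (i0 :: i1 :: tl2) hp0 hL ((i0 :: i1 :: tl2).length - 1) 0
        [String.ofList (PySem.List.slice cs none (some ((i0 : Nat) : Int)))]
        (by simp) (by simp)
      simp only [List.drop_succ_cons, List.drop_zero, Nat.cast_zero, List.getElem_cons_zero]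
        at hfold
      simp only [List.map_cons, List.foldl_cons] at hfold ⊢
      have hstep : mysplitBody cs (((i0 : Nat) : Int) :: ((i1 : Nat) : Int)
            :: tl2.map (fun j : Nat => (j : Int))) ([], 0, false) ((i0 : Nat) : Int)
          = ([String.ofList (PySem.List.slice cs none (some ((i0 : Nat) : Int)))], 0, false) := by
        have hg : PySem.List.pyGetD (((i0 : Nat) : Int) :: ((i1 : Nat) : Int)
            :: tl2.map (fun j : Nat => (j : Int))) 0 0 = ((i0 : Nat) : Int) := by
          rw [PySem.List.pyGetD_ofNat']
          simp
        simp [mysplitBody, hg]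
      rw [hstep, hfold]
      have h1 : PySem.List.slice cs none (some ((i0 : Nat) : Int)) = cs.take i0 := by
        rw [PySem.List.slice_to cs (by positivity)]
        simp
      simp [segs, h1]

-- the removal passes
theorem filter_ne_erase_empty (l : List String) :
    (l.erase "").filter (· ≠ "") = l.filter (· ≠ "") := by
  induction l with
  | nil => rfl
  | cons x xs ih =>
    rw [List.erase_cons]
    by_cases hx : x = ""
    · subst hx
      simp
    · have hb : (x == "") = false := beq_eq_false_iff_ne.2 hx
      simp only [hb, Bool.false_eq_true, if_false, List.filter_cons, ih]

theorem pass_filter (l : List String) (j : Nat) :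
    (pyRemovePass l j).filter (· ≠ "") = l.filter (· ≠ "") := by
  induction l, j using pyRemovePass.induct with
  | case1 l j h hj ih =>
    rw [pyRemovePass, dif_pos h, if_pos hj]
    have hm : "" ∈ l := hj ▸ List.getElem_mem h
    rw [PySem.List.remove?_eq_some_erase l "" hm, Option.getD_some] at ih ⊢
    rw [ih, filter_ne_erase_empty]
  | case2 l j h hj ih =>
    rw [pyRemovePass, dif_pos h, if_neg hj]
    exact ih
  | case3 l j h => rw [pyRemovePass, dif_neg h]

theorem pass_id (l : List String) (j : Nat) (h : "" ∉ l) : pyRemovePass l j = l := by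
  induction l, j using pyRemovePass.induct with
  | case1 l j hlt hj ih =>
    exact absurd (hj ▸ List.getElem_mem hlt) h
  | case2 l j hlt hj ih =>
    rw [pyRemovePass, dif_pos hlt, if_neg hj]
    exact ih h
  | case3 l j hlt => rw [pyRemovePass, dif_neg hlt]

theorem pass_count_le (l : List String) (j : Nat) :
    (pyRemovePass l j).count "" ≤ l.count "" := by
  induction l, j using pyRemovePass.induct with
  | case1 l j hlt hj ih =>
    rw [pyRemovePass, dif_pos hlt, if_pos hj]
    have hm : "" ∈ l := hj ▸ List.getElem_mem hlt
    rw [PySem.List.remove?_eq_some_erase l "" hm, Option.getD_some] at ih ⊢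
    exact le_trans ih (List.Sublist.count_le "" List.erase_sublist)
  | case2 l j hlt hj ih =>
    rw [pyRemovePass, dif_pos hlt, if_neg hj]
    exact ih
  | case3 l j hlt => rw [pyRemovePass, dif_neg hlt]

theorem pass_count_lt (l : List String) (j : Nat) (h : "" ∈ l.drop j) :
    (pyRemovePass l j).count "" < l.count "" := by
  induction l, j using pyRemovePass.induct with
  | case1 l j hlt hj ih =>
    rw [pyRemovePass, dif_pos hlt, if_pos hj]
    have hm : "" ∈ l := hj ▸ List.getElem_mem hlt
    rw [PySem.List.remove?_eq_some_erase l "" hm, Option.getD_some]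
    have hle := pass_count_le ((PySem.List.remove? l "").getD l) (j + 1)
    rw [PySem.List.remove?_eq_some_erase l "" hm, Option.getD_some] at hle
    have hc : (l.erase "").count "" = l.count "" - 1 := by
      rw [List.count_erase_self]
    have hpos : 0 < l.count "" := List.count_pos_iff.2 hm
    omega
  | case2 l j hlt hj ih =>
    rw [pyRemovePass, dif_pos hlt, if_neg hj]
    apply ih
    have hd : l.drop j = l[j] :: l.drop (j + 1) := List.drop_eq_getElem_cons hlt
    rw [hd] at h
    rcases List.mem_cons.1 h with h1 | h2
    · exact absurd h1.symm hj
    · exact h2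
  | case3 l j hlt =>
    rw [List.drop_eq_nil_of_le (by omega)] at h
    exact absurd h (List.not_mem_nil)

theorem iter_pass (n : Nat) : ∀ l : List String, l.count "" ≤ n →
    (fun l => pyRemovePass l 0)^[n] l = l.filter (· ≠ "") := by
  induction n with
  | zero =>
    intro l hl
    have hnm : "" ∉ l := by
      intro hm
      have := List.count_pos_iff.2 hm
      omega
    rw [Function.iterate_zero_apply]
    exact (List.filter_eq_self.2 (fun x hx => by
      simp only [ne_eq, decide_eq_true_eq]
      rintro rfl; exact hnm hx)).symm
  | succ n ih =>
    intro l hl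
    rw [Function.iterate_succ_apply]
    by_cases hm : "" ∈ l
    · have hlt := pass_count_lt l 0 (by simpa using hm)
      rw [ih _ (by omega), pass_filter]
    · have h0 : l.count "" = 0 := List.count_eq_zero.2 hm
      rw [pass_id l 0 hm, ih l (by omega)]

theorem foldl_const_iterate {α β : Type} (g : α → α) (xs : List β) (a : α) :
    xs.foldl (fun a _ => g a) a = g^[xs.length] a := by
  induction xs generalizing a with
  | nil => rfl
  | cons x xs ih => simp [List.foldl_cons, ih, Function.iterate_succ_apply]

theorem pre_eq' (s : String) :
    (if ((wsIdx s.toList).map (fun j : Nat => (j : Int))).length = 0 then [s]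
     else (((wsIdx s.toList).map (fun j : Nat => (j : Int))).foldl
        (mysplitBody s.toList ((wsIdx s.toList).map (fun j : Nat => (j : Int)))) ([], 0, false)).1)
      = (segs s.toList 0 (wsIdx s.toList)).map String.ofList := by
  have h := pre_eq s.toList
  rw [String.ofList_toList] at h
  exact h

theorem remove_fold (P : List String) :
    (PySem.List.pyRange 0 (P.length : Int)).foldl (fun l _ => pyRemovePass l 0) P
      = P.filter (· ≠ "") := by
  rw [foldl_const_iterate]
  have hlen : (PySem.List.pyRange 0 (P.length : Int)).length = P.length := by
    rw [PySem.List.pyRange_zero_natCast]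
    simp
  rw [hlen]
  exact iter_pass P.length P List.count_le_length

-- ===== VERDICT (by name: the statement is the Claim_ definition above) =====
theorem mysplit_spec : Claim_equal_mysplit := by
  intro s _
  unfold Spec_mysplit
  have hB : mysplit_alt s
      = ((pb [] (segs s.toList 0 (wsIdx s.toList))).filter (· ≠ [])).map String.ofList := by
    simpa [mysplit_alt] using alt_fold s.toList [] []
  rw [pb_nil _ (segs_ne_nil _ _ _)] at hB
  simp only [mysplit]
  rw [spaces_eq s.toList, pre_eq' s, remove_fold, hB, List.filter_map]
  congr 1
  apply List.filter_congr
  intro p _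
  simp [Function.comp]
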